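-- pv_equiv track=rewrite | github.com/LytheanSem/ABAC | Algorithm Design/test.py | find_min_price
-- ===== SOURCE A (Python) =====
-- def find_min_price(K, prices):
--     dp = [float('inf')] * (K + 1)
--     dp[0] = 0
--
--     for i in range(1, K + 1):
--         for j in range(1, len(prices) + 1):
--             if j <= i and prices[j - 1] != -1:
--                 dp[i] = min(dp[i], dp[i - j] + prices[j - 1])
--
--     return dp[K] if dp[K] != float('inf') else -1
-- ===== SOURCE B (Python) =====
-- def find_min_price(K, prices):
--     INF = float('inf')
--     usable = [(j, p) for j, p in enumerate(prices, 1) if p != -1]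
--     # pass 1: sieve downward from K the amounts actually needed to evaluate amount K
--     needed = [False] * (K + 1)
--     needed[K] = True
--     for n in range(K, 0, -1):
--         if needed[n]:
--             for j, _ in usable:
--                 if j <= n:
--                     needed[n - j] = True
--     # pass 2: evaluate the recurrence only at needed amounts (all others stay INF)
--     memo = [INF] * (K + 1)
--     memo[0] = 0
--     for n in range(1, K + 1):
--         if needed[n]:
--             best = INF
--             for j, p in usable:
--                 if j <= n:
--                     c = memo[n - j] + p
--                     if c < best:
--                         best = c
--             memo[n] = best
--     return memo[K] if memo[K] != INF else -1
-- ===== Notes on version B (the rewrite author's own statement) =====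
-- stated objective: alternative
-- what changed: B replaces A's dense nested-loop DP that relaxes every amount 1..K by a demand-driven two-pass scheme: a downward reachability sieve first marks exactly the amounts needed to evaluate amount K, then an upward pass evaluates the recurrence only at the marked amounts over a prefiltered (size, price) bundle list, leaving every other amount untouched (the hinted top-down memoized recursion made iterative, so it cannot hit Python's recursion limit).
import Mathlib
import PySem

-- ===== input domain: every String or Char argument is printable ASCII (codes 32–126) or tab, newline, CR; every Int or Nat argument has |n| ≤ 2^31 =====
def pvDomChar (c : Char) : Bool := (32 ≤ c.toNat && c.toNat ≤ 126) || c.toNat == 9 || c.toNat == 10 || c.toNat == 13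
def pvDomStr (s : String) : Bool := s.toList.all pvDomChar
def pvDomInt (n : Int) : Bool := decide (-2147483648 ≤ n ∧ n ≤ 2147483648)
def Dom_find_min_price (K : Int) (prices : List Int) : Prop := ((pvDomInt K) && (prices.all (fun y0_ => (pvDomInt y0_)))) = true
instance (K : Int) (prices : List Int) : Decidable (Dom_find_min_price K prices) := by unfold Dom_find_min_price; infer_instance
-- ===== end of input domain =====

-- B replaces A's dense DP sweep over all amounts by a two-pass demand-driven scheme: a downward
-- reachability sieve marks the amounts needed for amount K, then an upward pass evaluates the
-- recurrence only at those amounts (objective: alternative); return value only.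

-- Shared value helpers: `none` plays Python's float('inf') (prices are ints, so inf only arises
-- as the initial/unreachable value); omin is Python's min, oadd is inf-absorbing +, olt is <.
def omin : Option Int → Option Int → Option Int
  | none, b => b
  | some a, none => some a
  | some a, some b => some (min a b)

def oadd : Option Int → Int → Option Int
  | none, _ => none
  | some a, p => some (a + p)

def olt : Option Int → Option Int → Bool
  | none, _ => false
  | some _, none => true
  | some a, some b => a < b


-- Both Pythons index their tables only at in-range nonnegative positions (proved below), so the
-- tables are ported as Arrays with these in-range accessors (exact there; reads/writes Python
-- would raise on are outside Pre_):
def aget {α : Type} (a : Array α) (i : Int) (d : α) : α :=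
  if h : 0 ≤ i ∧ i.toNat < a.size then a[i.toNat]'h.2 else d

def aset {α : Type} (a : Array α) (i : Int) (v : α) : Array α :=
  if h : 0 ≤ i ∧ i.toNat < a.size then a.set i.toNat v h.2 else a

-- ===== PORT A =====
-- dp = [inf]*(K+1); dp[0] = 0  (for K < 0 Python raises IndexError here — excluded by Pre_)
def dpInitA (K : Int) : Array (Option Int) :=
  aset (Array.replicate (K + 1).toNat (none : Option Int)) 0 (some 0)

-- the inner `for j in range(1, len(prices)+1)` loop; the indices j-1, i, i-j are in range
-- whenever the guard holds
def AInnerA (prices : List Int) (dp : Array (Option Int)) (i : Int) : Array (Option Int) :=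
  (PySem.List.pyRange 1 ((prices.length : Int) + 1) 1).foldl (fun dp j =>
    if j ≤ i ∧ PySem.List.pyGetD prices (j - 1) 0 ≠ -1 then
      aset dp i
        (omin (aget dp i none)
          (oadd (aget dp (i - j) none) (PySem.List.pyGetD prices (j - 1) 0)))
    else dp) dp

def find_min_price (K : Int) (prices : List Int) : Int :=
  let dp := (PySem.List.pyRange 1 (K + 1) 1).foldl (AInnerA prices) (dpInitA K)
  match aget dp K none with
  | some v => v
  | none => -1

-- ===== PORT B =====
-- usable = [(j, p) for j, p in enumerate(prices, 1) if p != -1]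
def usableOf (prices : List Int) : List (Int × Int) :=
  (PySem.List.enumerate prices 1).filterMap (fun jp => if jp.2 ≠ -1 then some jp else none)

-- the inner marking loop of pass 1: for j, _ in usable: if j <= n: needed[n - j] = True
def markFromA (usable : List (Int × Int)) (M : Array Bool) (n : Int) : Array Bool :=
  usable.foldl (fun M jp => if jp.1 ≤ n then aset M (n - jp.1) true else M) M

-- pass 1: needed = [False]*(K+1); needed[K] = True; sieve downward from K
def neededA (K : Int) (prices : List Int) : Array Bool :=
  (PySem.List.pyRange K 0 (-1)).foldl
    (fun M n => if aget M n false then markFromA (usableOf prices) M n else M)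
    (aset (Array.replicate (K + 1).toNat false) K true)

-- best = INF; for j, p in usable: if j <= n: c = memo[n-j] + p; if c < best: best = c
def bestOfA (usable : List (Int × Int)) (memo : Array (Option Int)) (n : Int) : Option Int :=
  usable.foldl (fun best jp =>
    if jp.1 ≤ n then
      let c := oadd (aget memo (n - jp.1) none) jp.2
      if olt c best then c else best
    else best) none

def find_min_price_alt (K : Int) (prices : List Int) : Int :=
  let usable := usableOf prices
  let needed := neededA K prices
  -- pass 2: memo = [INF]*(K+1); memo[0] = 0; for n in range(1, K+1): if needed[n]: memo[n] = best
  let memo0 := aset (Array.replicate (K + 1).toNat (none : Option Int)) 0 (some 0)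
  let memo := (PySem.List.pyRange 1 (K + 1) 1).foldl
    (fun memo n => if aget needed n false then aset memo n (bestOfA usable memo n) else memo) memo0
  -- return memo[K] if memo[K] != INF else -1
  match aget memo K none with
  | some v => v
  | none => -1

-- ===== PRECONDITION & SPEC =====
-- A raises IndexError for K < 0 (dp is the empty list there, dp[0] = 0 fails); Pre_ excludes exactly that.
def Pre_find_min_price (K : Int) (prices : List Int) : Prop := 0 ≤ K
instance (K : Int) (prices : List Int) : Decidable (Pre_find_min_price K prices) := by
  unfold Pre_find_min_price; infer_instance

def pvWitness_find_min_price : Int × List Int := (3, [2, -1])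

def Spec_find_min_price (K : Int) (prices : List Int) (out : Int) : Prop := out = find_min_price_alt K prices
instance (K : Int) (prices : List Int) (out : Int) : Decidable (Spec_find_min_price K prices out) := by unfold Spec_find_min_price; infer_instance

-- ===== CLAIM (what is proved, stated in full; the proofs are below) =====
def Claim_equal_find_min_price : Prop := ∀ (K : Int) (prices : List Int), Dom_find_min_price K prices → Pre_find_min_price K prices → Spec_find_min_price K prices (find_min_price K prices)

-- ===== LEMMAS AND PROOFS =====

-- ---- list-level twins of the two ports (proof layer; the ports are proved equal to these) ----
def dpInit (K : Int) : List (Option Int) :=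
  PySem.List.pySetD (List.replicate (K + 1).toNat (none : Option Int)) 0 (some 0)

def AInner (prices : List Int) (dp : List (Option Int)) (i : Int) : List (Option Int) :=
  (PySem.List.pyRange 1 ((prices.length : Int) + 1) 1).foldl (fun dp j =>
    if j ≤ i ∧ PySem.List.pyGetD prices (j - 1) 0 ≠ -1 then
      PySem.List.pySetD dp i
        (omin (PySem.List.pyGetD dp i none)
          (oadd (PySem.List.pyGetD dp (i - j) none) (PySem.List.pyGetD prices (j - 1) 0)))
    else dp) dp

def markFrom (usable : List (Int × Int)) (M : List Bool) (n : Int) : List Bool :=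
  usable.foldl (fun M jp => if jp.1 ≤ n then PySem.List.pySetD M (n - jp.1) true else M) M

def neededOf (K : Int) (prices : List Int) : List Bool :=
  (PySem.List.pyRange K 0 (-1)).foldl
    (fun M n => if PySem.List.pyGetD M n false then markFrom (usableOf prices) M n else M)
    (PySem.List.pySetD (List.replicate (K + 1).toNat false) K true)

def bestOfL (usable : List (Int × Int)) (memo : List (Option Int)) (n : Int) : Option Int :=
  usable.foldl (fun best jp =>
    if jp.1 ≤ n then
      let c := oadd (PySem.List.pyGetD memo (n - jp.1) none) jp.2
      if olt c best then c else best
    else best) none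

-- ---- reference: the pull-form table T with T[i] = min cost for amount i (proof-only) ----
def pullStep (usable : List (Int × Int)) (dp : List (Option Int)) (i : Int) : Option Int :=
  usable.foldl (fun best jp =>
    if jp.1 ≤ i then omin best (oadd (PySem.List.pyGetD dp (i - jp.1) none) jp.2) else best) none

def pullTabI (prices : List Int) (t : Int) : List (Option Int) :=
  (PySem.List.pyRange 1 (t + 1) 1).foldl
    (fun dp i => dp ++ [pullStep (usableOf prices) dp i]) [some (0 : Int)]

def Dv (prices : List Int) (n : Nat) : Option Int :=
  PySem.List.pyGetD (pullTabI prices n) n none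

-- ---- small pySetD/pyGetD facts ----
lemma pySetD_eq_set {α : Type} (xs : List α) (i : Int) (v : α)
    (h0 : 0 ≤ i) (h : i.toNat < xs.length) :
    PySem.List.pySetD xs i v = xs.set i.toNat v := by
  unfold PySem.List.pySetD PySem.List.pySet? PySem.List.pyIdx?
  split_ifs <;> simp_all

lemma pySetD_of_ge {α : Type} (xs : List α) (i : Int) (v : α)
    (h0 : 0 ≤ i) (h : (xs.length : Int) ≤ i) :
    PySem.List.pySetD xs i v = xs := by
  unfold PySem.List.pySetD PySem.List.pySet? PySem.List.pyIdx?
  split_ifs <;> simp_all <;> omega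

lemma length_pySetD {α : Type} (xs : List α) (i : Int) (v : α) :
    (PySem.List.pySetD xs i v).length = xs.length := by
  unfold PySem.List.pySetD PySem.List.pySet?
  cases h : PySem.List.pyIdx? xs.length i <;> simp

lemma getD_set_self {α : Type} (l : List α) (n : Nat) (v d : α) (h : n < l.length) :
    (l.set n v).getD n d = v := by
  simp only [List.getD]
  simp [h]

lemma getD_set_ne {α : Type} (l : List α) (n m : Nat) (v d : α) (h : n ≠ m) :
    (l.set n v).getD m d = l.getD m d := by
  simp [List.getD, List.getElem?_set_ne h]

lemma getD_replicate_none (n k : Nat) :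
    (List.replicate n (none : Option Int)).getD k none = none := by
  simp [List.getD, List.getElem?_replicate]; split <;> rfl

lemma pyGetD_cons_pos {α : Type} (x : α) (xs : List α) (m : Int) (d : α) (h : 1 ≤ m) :
    PySem.List.pyGetD (x :: xs) m d = PySem.List.pyGetD xs (m - 1) d := by
  rw [PySem.List.pyGetD_of_nonneg _ _ (by omega), PySem.List.pyGetD_of_nonneg _ _ (by omega)]
  rw [show m.toNat = (m - 1).toNat + 1 from by omega]
  simp [List.getD]

lemma pyGetD_pySetD_self {α : Type} (M : List α) (x : Int) (v d : α)
    (h0 : 0 ≤ x) (h : x.toNat < M.length) :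
    PySem.List.pyGetD (PySem.List.pySetD M x v) x d = v := by
  rw [pySetD_eq_set _ _ _ h0 h, PySem.List.pyGetD_of_nonneg _ _ h0, getD_set_self _ _ _ _ (by simpa using h)]

lemma pyGetD_pySetD_ne {α : Type} (M : List α) (x y : Int) (v d : α)
    (hx : 0 ≤ x) (hy : 0 ≤ y) (hne : x ≠ y) :
    PySem.List.pyGetD (PySem.List.pySetD M y v) x d = PySem.List.pyGetD M x d := by
  by_cases hr : y.toNat < M.length
  · rw [pySetD_eq_set _ _ _ hy hr, PySem.List.pyGetD_of_nonneg _ _ hx, PySem.List.pyGetD_of_nonneg _ _ hx,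
      getD_set_ne _ _ _ _ _ (by omega)]
  · rw [pySetD_of_ge _ _ _ hy (by omega)]

lemma pyGetD_pySetD_true (M : List Bool) (x y : Int)
    (hx : 0 ≤ x) (hy : 0 ≤ y) (h : PySem.List.pyGetD M x false = true) :
    PySem.List.pyGetD (PySem.List.pySetD M y true) x false = true := by
  by_cases hxy : x = y
  · subst hxy
    by_cases hr : x.toNat < M.length
    · rw [pyGetD_pySetD_self _ _ _ _ hx hr]
    · rw [pySetD_of_ge _ _ _ hx (by omega)]; exact h
  · rw [pyGetD_pySetD_ne _ _ _ _ _ hx hy hxy]; exact h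

-- ---- A's inner loop flattens to an accumulator fold ----
lemma A_inner_flatten (prices : List Int) (i : Int) (hi : 0 ≤ i) :
    ∀ (js : List Int) (l : List (Option Int)), (∀ j ∈ js, 1 ≤ j) → i.toNat < l.length →
    js.foldl (fun dp j =>
      if j ≤ i ∧ PySem.List.pyGetD prices (j - 1) 0 ≠ -1 then
        PySem.List.pySetD dp i
          (omin (PySem.List.pyGetD dp i none)
            (oadd (PySem.List.pyGetD dp (i - j) none) (PySem.List.pyGetD prices (j - 1) 0)))
      else dp) l
    = l.set i.toNat
        (js.foldl (fun acc j =>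
          if j ≤ i ∧ PySem.List.pyGetD prices (j - 1) 0 ≠ -1 then
            omin acc (oadd (PySem.List.pyGetD l (i - j) none) (PySem.List.pyGetD prices (j - 1) 0))
          else acc) (PySem.List.pyGetD l i none)) := by
  intro js
  induction js with
  | nil =>
    intro l _ hlen
    simp only [List.foldl_nil]
    rw [PySem.List.pyGetD_of_nonneg _ _ hi]
    rw [List.getD_eq_getElem _ _ hlen, List.set_getElem_self]
  | cons j js ih =>
    intro l hjs hlen
    simp only [List.foldl_cons]
    by_cases hc : j ≤ i ∧ PySem.List.pyGetD prices (j - 1) 0 ≠ -1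
    · have hj1 : 1 ≤ j := hjs j (by simp)
      rw [if_pos hc, if_pos hc]
      set p := PySem.List.pyGetD prices (j - 1) 0 with hp
      set v0 := omin (PySem.List.pyGetD l i none)
        (oadd (PySem.List.pyGetD l (i - j) none) p) with hv0
      rw [pySetD_eq_set _ _ _ hi hlen]
      rw [ih (l.set i.toNat v0) (fun j' hj' => hjs j' (by simp [hj'])) (by simpa using hlen)]
      rw [List.set_set]
      have hread : PySem.List.pyGetD (l.set i.toNat v0) i none = v0 := by
        rw [PySem.List.pyGetD_of_nonneg _ _ hi, getD_set_self _ _ _ _ (by simpa using hlen)]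
      rw [hread]
      congr 1
      apply PySem.List.foldl_congr_mem
      intro acc j' hj'
      by_cases hc' : j' ≤ i ∧ PySem.List.pyGetD prices (j' - 1) 0 ≠ -1
      · rw [if_pos hc', if_pos hc']
        have h1 : 1 ≤ j' := hjs j' (by simp [hj'])
        have hnn : 0 ≤ i - j' := by omega
        rw [PySem.List.pyGetD_of_nonneg _ _ hnn, PySem.List.pyGetD_of_nonneg _ _ hnn,
          getD_set_ne _ _ _ _ _ (by omega)]
      · rw [if_neg hc', if_neg hc']
    · rw [if_neg hc, if_neg hc]
      exact ih l (fun j' hj' => hjs j' (by simp [hj'])) hlen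

-- ---- the guarded scan over j = 1..len(prices) is the fold over the prefiltered usable list ----
lemma inner_enum (i : Int) (R : Int → Option Int) :
    ∀ (xs : List Int) (s : Int) (acc : Option Int),
    (PySem.List.pyRange s (s + xs.length) 1).foldl
      (fun acc j => if j ≤ i ∧ PySem.List.pyGetD xs (j - s) 0 ≠ -1 then
          omin acc (oadd (R (i - j)) (PySem.List.pyGetD xs (j - s) 0)) else acc) acc
    = ((PySem.List.enumerate xs s).filterMap (fun jp => if jp.2 ≠ -1 then some jp else none)).foldl
      (fun best jp => if jp.1 ≤ i then omin best (oadd (R (i - jp.1)) jp.2) else best) acc := by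
  intro xs
  induction xs with
  | nil =>
    intro s acc
    rw [PySem.List.pyRange_one_eq_nil (by simp)]
    simp [PySem.List.enumerate]
  | cons x xs ih =>
    intro s acc
    rw [show s + ((x :: xs).length : Int) = (s + 1) + xs.length from by push_cast [List.length_cons]; omega]
    rw [PySem.List.pyRange_one_cons (by
      have : (0 : Int) ≤ (xs.length : Int) := by positivity
      omega)]
    simp only [List.foldl_cons, sub_self, PySem.List.pyGetD_zero_cons]
    have hcongr : ∀ a : Option Int,
        (PySem.List.pyRange (s + 1) ((s + 1) + xs.length) 1).foldl
          (fun acc j => if j ≤ i ∧ PySem.List.pyGetD (x :: xs) (j - s) 0 ≠ -1 then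
              omin acc (oadd (R (i - j)) (PySem.List.pyGetD (x :: xs) (j - s) 0)) else acc) a
        = (PySem.List.pyRange (s + 1) ((s + 1) + xs.length) 1).foldl
          (fun acc j => if j ≤ i ∧ PySem.List.pyGetD xs (j - (s + 1)) 0 ≠ -1 then
              omin acc (oadd (R (i - j)) (PySem.List.pyGetD xs (j - (s + 1)) 0)) else acc) a := by
      intro a
      apply PySem.List.foldl_congr_mem
      intro acc' j hj
      have hmem := (PySem.List.mem_pyRange_one).1 hj
      rw [pyGetD_cons_pos _ _ _ _ (by omega), show j - s - 1 = j - (s + 1) from by ring]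
    rw [hcongr, ih (s + 1)]
    rw [PySem.List.enumerate_cons, List.filterMap_cons]
    by_cases hx : x = -1
    · simp [hx]
    · rw [if_pos (show ((s, x).2 : Int) ≠ -1 from hx)]
      simp only [List.foldl_cons]
      congr 1
      by_cases hsi : s ≤ i
      · rw [if_pos ⟨hsi, hx⟩, if_pos hsi]
      · rw [if_neg (fun h => hsi h.1), if_neg hsi]

lemma pull_fold_length (prices : List Int) :
    ∀ (js : List Int) (init : List (Option Int)),
    (js.foldl (fun dp i => dp ++ [pullStep (usableOf prices) dp i]) init).length
      = init.length + js.length := by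
  intro js
  induction js with
  | nil => simp
  | cons j js ih => intro init; simp [ih]; omega

-- ---- A's table equals the pull table padded with inf ----
lemma outer_inv (K : Int) (prices : List Int) (hK : 0 ≤ K) :
    ∀ t : Nat, t ≤ K.toNat →
    (PySem.List.pyRange 1 ((t : Int) + 1) 1).foldl (AInner prices) (dpInit K)
    = pullTabI prices t ++ List.replicate (K.toNat - t) (none : Option Int) := by
  intro t
  induction t with
  | zero =>
    intro _
    rw [show ((0 : Nat) : Int) + 1 = 1 from by norm_num, PySem.List.pyRange_one_eq_nil le_rfl]
    simp only [List.foldl_nil, Nat.sub_zero]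
    unfold dpInit pullTabI
    rw [show (K + 1).toNat = K.toNat + 1 from by omega]
    rw [pySetD_eq_set _ _ _ le_rfl (by simp)]
    rw [show ((0 : Nat) : Int) + 1 = 1 from by norm_num, PySem.List.pyRange_one_eq_nil le_rfl]
    simp [List.replicate_succ]
  | succ t ih =>
    intro ht
    have ih' := ih (by omega)
    rw [show ((t + 1 : Nat) : Int) + 1 = ((t : Int) + 1) + 1 from by push_cast; ring]
    rw [PySem.List.pyRange_one_succ_right (by omega)]
    simp only [List.foldl_append, List.foldl_cons, List.foldl_nil]
    rw [ih']
    have hpull : pullTabI prices ((t + 1 : Nat) : Int)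
        = pullTabI prices t ++ [pullStep (usableOf prices) (pullTabI prices t) ((t : Int) + 1)] := by
      unfold pullTabI
      rw [show ((t + 1 : Nat) : Int) + 1 = ((t : Int) + 1) + 1 from by push_cast; ring]
      rw [PySem.List.pyRange_one_succ_right (by omega)]
      simp
    rw [hpull]
    set Bdp := pullTabI prices (t : Int) with hBdp
    have hlenB : Bdp.length = t + 1 := by
      rw [hBdp]
      unfold pullTabI
      rw [pull_fold_length, PySem.List.length_pyRange_one]
      simp; omega
    set i : Int := (t : Int) + 1 with hidef
    have hi : 0 ≤ i := by omega
    have hitn : i.toNat = t + 1 := by omega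
    set l : List (Option Int) := Bdp ++ List.replicate (K.toNat - t) none with hl
    have hlenl : l.length = (t + 1) + (K.toNat - t) := by
      rw [hl, List.length_append, List.length_replicate, hlenB]
    unfold AInner
    rw [show ((prices.length : Int) + 1) = 1 + prices.length from by ring]
    rw [A_inner_flatten prices i hi _ l
      (fun j hj => ((PySem.List.mem_pyRange_one).1 hj).1)
      (by rw [hlenl]; omega)]
    have hstart : PySem.List.pyGetD l i none = none := by
      rw [PySem.List.pyGetD_of_nonneg _ _ hi, hl,
        List.getD_append_right _ _ _ _ (by omega), getD_replicate_none]
    rw [hstart]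
    have hreads :
        (PySem.List.pyRange 1 (1 + (prices.length : Int)) 1).foldl
          (fun acc j => if j ≤ i ∧ PySem.List.pyGetD prices (j - 1) 0 ≠ -1 then
              omin acc (oadd (PySem.List.pyGetD l (i - j) none) (PySem.List.pyGetD prices (j - 1) 0))
            else acc) none
        = (PySem.List.pyRange 1 (1 + (prices.length : Int)) 1).foldl
          (fun acc j => if j ≤ i ∧ PySem.List.pyGetD prices (j - 1) 0 ≠ -1 then
              omin acc (oadd (PySem.List.pyGetD Bdp (i - j) none) (PySem.List.pyGetD prices (j - 1) 0))
            else acc) none := by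
      apply PySem.List.foldl_congr_mem
      intro acc j hj
      have hmem := (PySem.List.mem_pyRange_one).1 hj
      by_cases hc : j ≤ i ∧ PySem.List.pyGetD prices (j - 1) 0 ≠ -1
      · rw [if_pos hc, if_pos hc]
        have hnn : 0 ≤ i - j := by omega
        rw [PySem.List.pyGetD_of_nonneg _ _ hnn, PySem.List.pyGetD_of_nonneg _ _ hnn, hl,
          List.getD_append _ _ _ _ (by omega)]
      · rw [if_neg hc, if_neg hc]
    rw [hreads]
    rw [inner_enum i (fun k => PySem.List.pyGetD Bdp k none) prices 1 none]
    have haltstep :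
        ((PySem.List.enumerate prices 1).filterMap
            (fun jp => if jp.2 ≠ -1 then some jp else none)).foldl
          (fun best jp => if jp.1 ≤ i then
              omin best (oadd ((fun k => PySem.List.pyGetD Bdp k none) (i - jp.1)) jp.2)
            else best) none
        = pullStep (usableOf prices) Bdp i := rfl
    rw [haltstep]
    rw [hl, List.set_append, if_neg (by rw [hlenB]; omega), hlenB, hitn]
    rw [show (K.toNat - t) = (K.toNat - (t + 1)) + 1 from by omega, List.replicate_succ]
    simp

-- ---- pull-table structure ----
lemma usable_ge_one (prices : List Int) : ∀ jp ∈ usableOf prices, 1 ≤ jp.1 := by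
  intro jp hjp
  unfold usableOf at hjp
  obtain ⟨x, hx, hfx⟩ := List.mem_filterMap.1 hjp
  have hx1 : x ∈ PySem.List.enumerate prices 1 := hx
  have : jp = x := by by_cases h : x.2 ≠ -1 <;> simp [h] at hfx <;> simp [hfx]
  subst this
  have : jp.1 ∈ (PySem.List.enumerate prices 1).map (·.1) := List.mem_map_of_mem hx1
  rw [PySem.List.map_fst_enumerate] at this
  exact ((PySem.List.mem_pyRange_one).1 this).1

lemma pullTab_length (prices : List Int) (n : Nat) :
    (pullTabI prices n).length = n + 1 := by
  unfold pullTabI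
  rw [pull_fold_length, PySem.List.length_pyRange_one]
  simp; omega

lemma pullTab_succ (prices : List Int) (n : Nat) :
    pullTabI prices ((n + 1 : Nat) : Int)
      = pullTabI prices n ++ [pullStep (usableOf prices) (pullTabI prices n) ((n : Int) + 1)] := by
  unfold pullTabI
  rw [show ((n + 1 : Nat) : Int) + 1 = ((n : Int) + 1) + 1 from by push_cast; ring]
  rw [PySem.List.pyRange_one_succ_right (by omega)]
  simp

lemma Dv_stable (prices : List Int) (m n : Nat) (h : m ≤ n) :
    PySem.List.pyGetD (pullTabI prices n) m none = Dv prices m := by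
  induction n with
  | zero =>
    have : m = 0 := by omega
    subst this; rfl
  | succ n ih =>
    by_cases hm : m ≤ n
    · rw [pullTab_succ, PySem.List.pyGetD_of_nonneg _ _ (by positivity)]
      simp only [Int.toNat_natCast]
      rw [List.getD_append _ _ _ _ (by rw [pullTab_length]; omega)]
      have := ih hm
      rw [PySem.List.pyGetD_of_nonneg _ _ (by positivity)] at this
      simp only [Int.toNat_natCast] at this
      exact this
    · have : m = n + 1 := by omega
      subst this; rfl

lemma Dv_zero (prices : List Int) : Dv prices 0 = some 0 := by
  unfold Dv pullTabI
  rw [show ((0 : Nat) : Int) + 1 = 1 from by norm_num, PySem.List.pyRange_one_eq_nil le_rfl]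
  rfl

lemma Dv_succ (prices : List Int) (n : Nat) :
    Dv prices (n + 1)
      = (usableOf prices).foldl (fun best jp =>
          if jp.1 ≤ (n : Int) + 1 then
            omin best (oadd (Dv prices ((n : Int) + 1 - jp.1).toNat) jp.2) else best) none := by
  have hstep : Dv prices (n + 1) = pullStep (usableOf prices) (pullTabI prices n) ((n : Int) + 1) := by
    unfold Dv
    rw [pullTab_succ, PySem.List.pyGetD_of_nonneg _ _ (by positivity)]
    simp only [Int.toNat_natCast]
    rw [List.getD_append_right _ _ _ _ (pullTab_length prices n).le]
    rw [pullTab_length]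
    simp
  rw [hstep]
  unfold pullStep
  apply PySem.List.foldl_congr_mem
  intro best jp hjp
  have h1 := usable_ge_one prices jp hjp
  by_cases hg : jp.1 ≤ (n : Int) + 1
  · rw [if_pos hg, if_pos hg]
    have hread := Dv_stable prices ((n : Int) + 1 - jp.1).toNat n (by omega)
    rw [show ((((n : Int) + 1 - jp.1).toNat : Nat) : Int) = (n : Int) + 1 - jp.1 from by omega] at hread
    rw [hread]
  · rw [if_neg hg, if_neg hg]

-- ---- A's value in terms of Dv ----
lemma AL_eq_Dv (K : Int) (prices : List Int) (hK : 0 ≤ K) :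
    (match PySem.List.pyGetD
        ((PySem.List.pyRange 1 (K + 1) 1).foldl (AInner prices) (dpInit K)) K none with
      | some v => v
      | none => (-1 : Int))
      = match Dv prices K.toNat with
        | some v => v
        | none => -1 := by
  have h := outer_inv K prices hK K.toNat le_rfl
  rw [show ((K.toNat : Nat) : Int) = K from by omega] at h
  simp only [Nat.sub_self, List.replicate_zero, List.append_nil] at h
  rw [h]
  have hst := Dv_stable prices K.toNat K.toNat le_rfl
  rw [show ((K.toNat : Nat) : Int) = K from by omega] at hst
  rw [hst]

-- ---- pass 1: the sieve's properties ----
lemma mark_length (u : List (Int × Int)) (n : Int) :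
    ∀ M : List Bool, (markFrom u M n).length = M.length := by
  unfold markFrom
  induction u with
  | nil => intro M; rfl
  | cons jp u ih =>
    intro M
    simp only [List.foldl_cons]
    by_cases h : jp.1 ≤ n
    · rw [if_pos h, ih, length_pySetD]
    · rw [if_neg h, ih]

lemma mark_mono (u : List (Int × Int)) (n : Int) (hu : ∀ jp ∈ u, 1 ≤ jp.1) (x : Int) (hx : 0 ≤ x) :
    ∀ M : List Bool, PySem.List.pyGetD M x false = true →
      PySem.List.pyGetD (markFrom u M n) x false = true := by
  unfold markFrom
  induction u with
  | nil => intro M h; exact h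
  | cons jp u ih =>
    intro M h
    simp only [List.foldl_cons]
    by_cases hg : jp.1 ≤ n
    · rw [if_pos hg]
      exact ih (fun q hq => hu q (by simp [hq])) _
        (pyGetD_pySetD_true M x (n - jp.1) hx (by have := hu jp (by simp); omega) h)
    · rw [if_neg hg]
      exact ih (fun q hq => hu q (by simp [hq])) _ h

lemma mark_sets (u : List (Int × Int)) (n : Int) (hu : ∀ jp ∈ u, 1 ≤ jp.1) (hn1 : 1 ≤ n) :
    ∀ M : List Bool, n < (M.length : Int) →
      ∀ jp ∈ u, jp.1 ≤ n → PySem.List.pyGetD (markFrom u M n) (n - jp.1) false = true := by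
  induction u with
  | nil => intro M _ jp h; cases h
  | cons jp0 u ih =>
    intro M hlen jp hjp hg
    have hu' : ∀ q ∈ u, 1 ≤ q.1 := fun q hq => hu q (by simp [hq])
    rcases List.mem_cons.1 hjp with h | h
    · subst h
      unfold markFrom
      simp only [List.foldl_cons, if_pos hg]
      show PySem.List.pyGetD (markFrom u (PySem.List.pySetD M (n - jp.1) true) n) (n - jp.1) false = true
      apply mark_mono u n hu' _ (by have := hu jp (by simp); omega)
      exact pyGetD_pySetD_self _ _ _ _ (by have := hu jp (by simp); omega)
        (by have := hu jp (by simp); omega)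
    · unfold markFrom
      simp only [List.foldl_cons]
      by_cases hg0 : jp0.1 ≤ n
      · rw [if_pos hg0]
        exact ih hu' (PySem.List.pySetD M (n - jp0.1) true) (by rw [length_pySetD]; exact hlen) jp h hg
      · rw [if_neg hg0]
        exact ih hu' M hlen jp h hg

lemma mark_untouched (u : List (Int × Int)) (n : Int) (hu : ∀ jp ∈ u, 1 ≤ jp.1)
    (x : Int) (hx : n ≤ x) :
    ∀ M : List Bool, PySem.List.pyGetD (markFrom u M n) x false = PySem.List.pyGetD M x false := by
  unfold markFrom
  induction u with
  | nil => intro M; rfl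
  | cons jp u ih =>
    intro M
    simp only [List.foldl_cons]
    have hu' : ∀ q ∈ u, 1 ≤ q.1 := fun q hq => hu q (by simp [hq])
    by_cases hg : jp.1 ≤ n
    · rw [if_pos hg, ih hu']
      have h1 : 1 ≤ jp.1 := hu jp (by simp)
      exact pyGetD_pySetD_ne _ _ _ _ _ (by omega) (by omega) (by omega)
    · rw [if_neg hg, ih hu']

-- closure of a mark array under predecessors above threshold t
def SieveClosed (u : List (Int × Int)) (K : Int) (M : List Bool) (t : Int) : Prop :=
  ∀ n : Int, t < n → n ≤ K → PySem.List.pyGetD M n false = true →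
    ∀ jp ∈ u, jp.1 ≤ n → PySem.List.pyGetD M (n - jp.1) false = true

lemma sieve_inv (u : List (Int × Int)) (K : Int) (hu : ∀ jp ∈ u, 1 ≤ jp.1) (hK : 0 ≤ K) :
    ∀ (c : Nat) (a : Int) (M : List Bool), a = (c : Int) → a ≤ K →
      M.length = K.toNat + 1 → SieveClosed u K M a →
      SieveClosed u K
        ((PySem.List.pyRange a 0 (-1)).foldl
          (fun M n => if PySem.List.pyGetD M n false then markFrom u M n else M) M) 0
      ∧ (∀ x : Int, 0 ≤ x → PySem.List.pyGetD M x false = true →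
          PySem.List.pyGetD
            ((PySem.List.pyRange a 0 (-1)).foldl
              (fun M n => if PySem.List.pyGetD M n false then markFrom u M n else M) M) x false = true) := by
  intro c
  induction c with
  | zero =>
    intro a M ha _ _ hcl
    have ha0 : a = 0 := by exact_mod_cast ha
    subst ha0
    rw [PySem.List.pyRange_neg_one_eq_nil le_rfl]
    exact ⟨hcl, fun x _ h => h⟩
  | succ c ih =>
    intro a M ha haK hlen hcl
    have ha1 : 1 ≤ a := by omega
    rw [PySem.List.pyRange_neg_one_cons (by omega)]
    simp only [List.foldl_cons]
    set M' := if PySem.List.pyGetD M a false then markFrom u M a else M with hM'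
    have hlen' : M'.length = K.toNat + 1 := by
      rw [hM']; split_ifs with h
      · rw [mark_length]; exact hlen
      · exact hlen
    have hmono : ∀ x : Int, 0 ≤ x → PySem.List.pyGetD M x false = true →
        PySem.List.pyGetD M' x false = true := by
      intro x hx h
      rw [hM']; split_ifs with hb
      · exact mark_mono u a hu x hx M h
      · exact h
    have huntouched : ∀ x : Int, a ≤ x → PySem.List.pyGetD M' x false = PySem.List.pyGetD M x false := by
      intro x hx
      rw [hM']; split_ifs with hb
      · exact mark_untouched u a hu x hx M
      · rfl
    have hcl' : SieveClosed u K M' (a - 1) := by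
      intro n hn hnK htrue jp hjp hg
      have h1 : 1 ≤ jp.1 := hu jp hjp
      by_cases hna : n = a
      · subst hna
        rw [huntouched n le_rfl] at htrue
        rw [hM', if_pos htrue]
        exact mark_sets u n hu (by omega) M (by rw [hlen]; omega) jp hjp hg
      · have hna' : a < n := by omega
        rw [huntouched n (by omega)] at htrue
        exact hmono (n - jp.1) (by omega) (hcl n hna' hnK htrue jp hjp hg)
    obtain ⟨hres, hresmono⟩ := ih (a - 1) M' (by omega) (by omega) hlen' hcl'
    exact ⟨hres, fun x hx h => hresmono x hx (hmono x hx h)⟩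

lemma needed_init_facts (K : Int) (prices : List Int) (hK : 0 ≤ K) :
    SieveClosed (usableOf prices) K (neededOf K prices) 0
    ∧ PySem.List.pyGetD (neededOf K prices) K false = true := by
  have hlen0 : (PySem.List.pySetD (List.replicate (K + 1).toNat false) K true).length = K.toNat + 1 := by
    rw [length_pySetD, List.length_replicate]; omega
  have hcl0 : SieveClosed (usableOf prices) K (PySem.List.pySetD (List.replicate (K + 1).toNat false) K true) K := by
    intro n hn hnK _ jp _ _
    omega
  obtain ⟨h1, h2⟩ := sieve_inv (usableOf prices) K (usable_ge_one prices) hK K.toNat K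
    (PySem.List.pySetD (List.replicate (K + 1).toNat false) K true) (by omega) le_rfl hlen0 hcl0
  refine ⟨h1, h2 K hK ?_⟩
  exact pyGetD_pySetD_self _ _ _ _ hK (by rw [List.length_replicate]; omega)

lemma needed_closed (K : Int) (prices : List Int) (hK : 0 ≤ K) :
    SieveClosed (usableOf prices) K (neededOf K prices) 0 :=
  (needed_init_facts K prices hK).1

lemma needed_K (K : Int) (prices : List Int) (hK : 0 ≤ K) :
    PySem.List.pyGetD (neededOf K prices) K false = true :=
  (needed_init_facts K prices hK).2

-- ---- pass 2 ----
lemma olt_sel (b c : Option Int) : (if olt c b then c else b) = omin b c := by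
  cases b with
  | none => cases c <;> simp [olt, omin]
  | some vb =>
    cases c with
    | none => simp [olt, omin]
    | some vc =>
      by_cases h : vc < vb
      · rw [if_pos (by simp [olt, h]), show omin (some vb) (some vc) = some (min vb vc) from rfl,
          min_eq_right (le_of_lt h)]
      · rw [if_neg (by simp [olt]; omega), show omin (some vb) (some vc) = some (min vb vc) from rfl,
          min_eq_left (by omega)]

-- ---- pass 2 over the list twin ----
lemma best_stepL (K : Int) (prices : List Int) (hK : 0 ≤ K) (t : Nat) (ht : t + 1 ≤ K.toNat)
    (memo : List (Option Int))
    (hmemo : ∀ k : Int, 0 ≤ k → k ≤ K → PySem.List.pyGetD memo k none = if k = 0 then some 0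
      else if 1 ≤ k ∧ k ≤ (t : Int) ∧ PySem.List.pyGetD (neededOf K prices) k false = true
      then Dv prices k.toNat else none)
    (hN : PySem.List.pyGetD (neededOf K prices) ((t : Int) + 1) false = true) :
    bestOfL (usableOf prices) memo ((t : Int) + 1) = Dv prices (t + 1) := by
  rw [Dv_succ]
  unfold bestOfL
  apply PySem.List.foldl_congr_mem
  intro best jp hjp
  have h1 := usable_ge_one prices jp hjp
  by_cases hg : jp.1 ≤ (t : Int) + 1
  · rw [if_pos hg, if_pos hg]
    have hread : PySem.List.pyGetD memo ((t : Int) + 1 - jp.1) none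
        = Dv prices ((t : Int) + 1 - jp.1).toNat := by
      rw [hmemo ((t : Int) + 1 - jp.1) (by omega) (by omega)]
      by_cases h0 : (t : Int) + 1 - jp.1 = 0
      · rw [if_pos h0, h0]; simp [Dv_zero]
      · rw [if_neg h0]
        have hNk : PySem.List.pyGetD (neededOf K prices) ((t : Int) + 1 - jp.1) false = true :=
          needed_closed K prices hK ((t : Int) + 1) (by omega) (by omega) hN jp hjp hg
        rw [if_pos ⟨by omega, by omega, hNk⟩]
    show (let c := oadd _ jp.2; if olt c best then c else best) = _
    rw [hread]
    exact olt_sel best (oadd (Dv prices ((t : Int) + 1 - jp.1).toNat) jp.2)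
  · rw [if_neg hg, if_neg hg]

lemma pass2_inv (K : Int) (prices : List Int) (hK : 0 ≤ K) :
    ∀ t : Nat, t ≤ K.toNat →
    ((PySem.List.pyRange 1 ((t : Int) + 1) 1).foldl
      (fun memo n => if PySem.List.pyGetD (neededOf K prices) n false then
          PySem.List.pySetD memo n (bestOfL (usableOf prices) memo n) else memo)
      (PySem.List.pySetD (List.replicate (K + 1).toNat (none : Option Int)) 0 (some 0))).length
      = K.toNat + 1
    ∧ ∀ k : Int, 0 ≤ k → k ≤ K →
    ((PySem.List.pyRange 1 ((t : Int) + 1) 1).foldl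
      (fun memo n => if PySem.List.pyGetD (neededOf K prices) n false then
          PySem.List.pySetD memo n (bestOfL (usableOf prices) memo n) else memo)
      (PySem.List.pySetD (List.replicate (K + 1).toNat (none : Option Int)) 0 (some 0))).getD k.toNat none
    = if k = 0 then some 0
      else if 1 ≤ k ∧ k ≤ (t : Int) ∧ PySem.List.pyGetD (neededOf K prices) k false = true
      then Dv prices k.toNat else none := by
  intro t
  induction t with
  | zero =>
    intro _
    rw [show ((0 : Nat) : Int) + 1 = 1 from by norm_num, PySem.List.pyRange_one_eq_nil le_rfl]
    simp only [List.foldl_nil]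
    refine ⟨by rw [length_pySetD, List.length_replicate]; omega, ?_⟩
    intro k hk0 hkK
    by_cases hk : k = 0
    · rw [if_pos hk, hk]
      have := pyGetD_pySetD_self (List.replicate (K + 1).toNat (none : Option Int)) 0 (some (0 : Int)) none
        le_rfl (by rw [List.length_replicate]; omega)
      rw [PySem.List.pyGetD_of_nonneg _ _ le_rfl] at this
      exact this
    · rw [if_neg hk, if_neg (by intro h; have := h.1; have := h.2.1; omega)]
      have := pyGetD_pySetD_ne (List.replicate (K + 1).toNat (none : Option Int)) k 0 (some (0 : Int)) none
        hk0 le_rfl hk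
      rw [PySem.List.pyGetD_of_nonneg _ _ hk0, PySem.List.pyGetD_of_nonneg _ _ hk0] at this
      rw [this]
      exact getD_replicate_none _ _
  | succ t ih =>
    intro ht
    obtain ⟨ihlen, ihget⟩ := ih (by omega)
    have iht : ∀ k : Int, 0 ≤ k → k ≤ K →
        PySem.List.pyGetD
          ((PySem.List.pyRange 1 ((t : Int) + 1) 1).foldl
            (fun memo n => if PySem.List.pyGetD (neededOf K prices) n false then
                PySem.List.pySetD memo n (bestOfL (usableOf prices) memo n) else memo)
            (PySem.List.pySetD (List.replicate (K + 1).toNat (none : Option Int)) 0 (some 0))) k none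
        = if k = 0 then some 0
          else if 1 ≤ k ∧ k ≤ (t : Int) ∧ PySem.List.pyGetD (neededOf K prices) k false = true
          then Dv prices k.toNat else none := by
      intro k hk0 hkK
      rw [PySem.List.pyGetD_of_nonneg _ _ hk0]
      exact ihget k hk0 hkK
    rw [show ((t + 1 : Nat) : Int) + 1 = ((t : Int) + 1) + 1 from by push_cast; ring]
    rw [PySem.List.pyRange_one_succ_right (by omega)]
    simp only [List.foldl_append, List.foldl_cons, List.foldl_nil]
    set M := (PySem.List.pyRange 1 ((t : Int) + 1) 1).foldl
      (fun memo n => if PySem.List.pyGetD (neededOf K prices) n false then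
          PySem.List.pySetD memo n (bestOfL (usableOf prices) memo n) else memo)
      (PySem.List.pySetD (List.replicate (K + 1).toNat (none : Option Int)) 0 (some 0)) with hM
    by_cases hN : PySem.List.pyGetD (neededOf K prices) ((t : Int) + 1) false = true
    · rw [if_pos hN]
      refine ⟨by rw [length_pySetD, ihlen], ?_⟩
      intro k hk0 hkK
      by_cases hk : k = (t : Int) + 1
      · have hself := pyGetD_pySetD_self M ((t : Int) + 1) (bestOfL (usableOf prices) M ((t : Int) + 1)) none
          (by omega) (by rw [ihlen]; omega)
        rw [PySem.List.pyGetD_of_nonneg _ _ (show (0:Int) ≤ (t : Int) + 1 from by omega)] at hself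
        rw [hk, hself]
        rw [if_neg (by omega), if_pos ⟨by omega, by omega, hN⟩]
        rw [show ((t : Int) + 1).toNat = t + 1 from by omega]
        exact best_stepL K prices hK t ht M iht hN
      · have hne := pyGetD_pySetD_ne M k ((t : Int) + 1) (bestOfL (usableOf prices) M ((t : Int) + 1)) none
          hk0 (by omega) hk
        rw [PySem.List.pyGetD_of_nonneg _ _ hk0, PySem.List.pyGetD_of_nonneg _ _ hk0] at hne
        rw [hne, ihget k hk0 hkK]
        by_cases hk0' : k = 0
        · rw [if_pos hk0', if_pos hk0']
        · rw [if_neg hk0', if_neg hk0']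
          by_cases hc : 1 ≤ k ∧ k ≤ (t : Int) ∧ PySem.List.pyGetD (neededOf K prices) k false = true
          · rw [if_pos hc, if_pos ⟨hc.1, by omega, hc.2.2⟩]
          · rw [if_neg hc, if_neg (by rintro ⟨a, b, c⟩; exact hc ⟨a, by omega, c⟩)]
    · rw [if_neg hN]
      refine ⟨ihlen, ?_⟩
      intro k hk0 hkK
      rw [ihget k hk0 hkK]
      by_cases hk0' : k = 0
      · rw [if_pos hk0', if_pos hk0']
      · rw [if_neg hk0', if_neg hk0']
        by_cases hc : 1 ≤ k ∧ k ≤ (t : Int) ∧ PySem.List.pyGetD (neededOf K prices) k false = true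
        · rw [if_pos hc, if_pos ⟨hc.1, by omega, hc.2.2⟩]
        · rw [if_neg hc]
          rw [if_neg (by
            rintro ⟨a, b, c⟩
            by_cases hk1 : k = (t : Int) + 1
            · rw [hk1] at c; exact absurd c hN
            · exact hc ⟨a, by omega, c⟩)]

-- ---- Array/List simulation ----
lemma foldl_sim {γ α β : Type} (R : α → β → Prop) (l : List γ) (f : α → γ → α) (g : β → γ → β) :
    ∀ (a : α) (b : β), R a b → (∀ a b x, x ∈ l → R a b → R (f a x) (g b x)) →
    R (l.foldl f a) (l.foldl g b) := by
  induction l with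
  | nil => intro a b h _; exact h
  | cons x l ih =>
    intro a b h hstep
    exact ih _ _ (hstep a b x (by simp) h) (fun a b y hy => hstep a b y (by simp [hy]))

lemma aget_eq {α : Type} (a : Array α) (i : Int) (d : α) (h : 0 ≤ i) :
    aget a i d = PySem.List.pyGetD a.toList i d := by
  unfold aget
  rw [PySem.List.pyGetD_of_nonneg _ _ h]
  split_ifs with hr
  · rw [List.getD_eq_getElem _ _ (by rw [← Array.size_eq_length_toList]; exact hr.2)]
    exact Array.getElem_toList hr.2
  · have : a.toList.length ≤ i.toNat := by
      rw [← Array.size_eq_length_toList]; omega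
    simp [List.getD, List.getElem?_eq_none this]

lemma aset_toList {α : Type} (a : Array α) (i : Int) (v : α) (h : 0 ≤ i) :
    (aset a i v).toList = PySem.List.pySetD a.toList i v := by
  unfold aset
  split_ifs with hr
  · rw [pySetD_eq_set _ _ _ h (by rw [← Array.size_eq_length_toList]; exact hr.2)]
    exact Array.toList_set a _ _ _
  · rw [pySetD_of_ge _ _ _ h (by rw [← Array.size_eq_length_toList]; omega)]

lemma A_port_sim (K : Int) (prices : List Int) (hK : 0 ≤ K) :
    find_min_price K prices
      = match PySem.List.pyGetD
          ((PySem.List.pyRange 1 (K + 1) 1).foldl (AInner prices) (dpInit K)) K none with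
        | some v => v
        | none => (-1 : Int) := by
  unfold find_min_price
  show (match aget ((PySem.List.pyRange 1 (K + 1) 1).foldl (AInnerA prices) (dpInitA K)) K none with
    | some v => v | none => (-1 : Int)) = _
  have hsim : ((PySem.List.pyRange 1 (K + 1) 1).foldl (AInnerA prices) (dpInitA K)).toList
      = (PySem.List.pyRange 1 (K + 1) 1).foldl (AInner prices) (dpInit K) := by
    apply foldl_sim (fun (a : Array (Option Int)) (b : List (Option Int)) => a.toList = b)
    · unfold dpInitA dpInit
      rw [aset_toList _ _ _ le_rfl, Array.toList_replicate]
    · intro a b i hi hR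
      have hi1 : 1 ≤ i := ((PySem.List.mem_pyRange_one).1 hi).1
      unfold AInnerA AInner
      apply foldl_sim (fun (a : Array (Option Int)) (b : List (Option Int)) => a.toList = b) _ _ _ _ _ hR
      intro a b j hj hR'
      have hj1 : 1 ≤ j := ((PySem.List.mem_pyRange_one).1 hj).1
      by_cases hc : j ≤ i ∧ PySem.List.pyGetD prices (j - 1) 0 ≠ -1
      · rw [if_pos hc, if_pos hc]
        rw [aset_toList _ _ _ (by omega), hR',
          aget_eq _ _ _ (by omega), aget_eq _ _ _ (by omega), hR']
      · rw [if_neg hc, if_neg hc]; exact hR'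
  rw [show aget ((PySem.List.pyRange 1 (K + 1) 1).foldl (AInnerA prices) (dpInitA K)) K none
      = PySem.List.pyGetD ((PySem.List.pyRange 1 (K + 1) 1).foldl (AInner prices) (dpInit K)) K none from by
    rw [aget_eq _ _ _ hK, hsim]]

lemma needed_sim (K : Int) (prices : List Int) (hK : 0 ≤ K) :
    (neededA K prices).toList = neededOf K prices := by
  unfold neededA neededOf
  apply foldl_sim (fun (a : Array Bool) (b : List Bool) => a.toList = b)
  · rw [aset_toList _ _ _ hK, Array.toList_replicate]
  · intro a b n hn hR
    have hn1 : 1 ≤ n := by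
      have := (PySem.List.mem_pyRange_neg_one).1 hn
      omega
    rw [aget_eq _ _ _ (by omega), hR]
    by_cases hb : PySem.List.pyGetD b n false = true
    · rw [if_pos hb, if_pos hb]
      unfold markFromA markFrom
      apply foldl_sim (fun (a : Array Bool) (b : List Bool) => a.toList = b) _ _ _ _ _ hR
      intro a b jp hjp hR'
      have h1 := usable_ge_one prices jp hjp
      by_cases hg : jp.1 ≤ n
      · rw [if_pos hg, if_pos hg, aset_toList _ _ _ (by omega), hR']
      · rw [if_neg hg, if_neg hg]; exact hR'
    · rw [if_neg hb, if_neg hb]; exact hR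

lemma B_port_sim (K : Int) (prices : List Int) (hK : 0 ≤ K) :
    find_min_price_alt K prices
      = match PySem.List.pyGetD
          ((PySem.List.pyRange 1 (K + 1) 1).foldl
            (fun memo n => if PySem.List.pyGetD (neededOf K prices) n false then
                PySem.List.pySetD memo n (bestOfL (usableOf prices) memo n) else memo)
            (PySem.List.pySetD (List.replicate (K + 1).toNat (none : Option Int)) 0 (some 0))) K none with
        | some v => v
        | none => (-1 : Int) := by
  unfold find_min_price_alt
  show (match aget ((PySem.List.pyRange 1 (K + 1) 1).foldl
      (fun memo n => if aget (neededA K prices) n false then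
          aset memo n (bestOfA (usableOf prices) memo n) else memo)
      (aset (Array.replicate (K + 1).toNat (none : Option Int)) 0 (some 0))) K none with
    | some v => v | none => (-1 : Int)) = _
  have hsim : ((PySem.List.pyRange 1 (K + 1) 1).foldl
        (fun memo n => if aget (neededA K prices) n false then
            aset memo n (bestOfA (usableOf prices) memo n) else memo)
        (aset (Array.replicate (K + 1).toNat (none : Option Int)) 0 (some 0))).toList
      = (PySem.List.pyRange 1 (K + 1) 1).foldl
        (fun memo n => if PySem.List.pyGetD (neededOf K prices) n false then
            PySem.List.pySetD memo n (bestOfL (usableOf prices) memo n) else memo)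
        (PySem.List.pySetD (List.replicate (K + 1).toNat (none : Option Int)) 0 (some 0)) := by
    apply foldl_sim (fun (a : Array (Option Int)) (b : List (Option Int)) => a.toList = b)
    · rw [aset_toList _ _ _ le_rfl, Array.toList_replicate]
    · intro a b n hn hR
      have hn1 : 1 ≤ n := ((PySem.List.mem_pyRange_one).1 hn).1
      rw [aget_eq _ _ _ (by omega), needed_sim K prices hK]
      by_cases hb : PySem.List.pyGetD (neededOf K prices) n false = true
      · rw [if_pos hb, if_pos hb]
        have hbest : bestOfA (usableOf prices) a n = bestOfL (usableOf prices) b n := by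
          unfold bestOfA bestOfL
          apply PySem.List.foldl_congr_mem
          intro best jp hjp
          have h1 := usable_ge_one prices jp hjp
          by_cases hg : jp.1 ≤ n
          · rw [if_pos hg, if_pos hg]
            show (let c := oadd (aget a (n - jp.1) none) jp.2; if olt c best then c else best) = _
            rw [aget_eq _ _ _ (by omega), hR]
          · rw [if_neg hg, if_neg hg]
        rw [aset_toList _ _ _ (by omega), hR, hbest]
      · rw [if_neg hb, if_neg hb]; exact hR
  rw [show aget ((PySem.List.pyRange 1 (K + 1) 1).foldl
        (fun memo n => if aget (neededA K prices) n false then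
            aset memo n (bestOfA (usableOf prices) memo n) else memo)
        (aset (Array.replicate (K + 1).toNat (none : Option Int)) 0 (some 0))) K none
      = PySem.List.pyGetD ((PySem.List.pyRange 1 (K + 1) 1).foldl
          (fun memo n => if PySem.List.pyGetD (neededOf K prices) n false then
              PySem.List.pySetD memo n (bestOfL (usableOf prices) memo n) else memo)
          (PySem.List.pySetD (List.replicate (K + 1).toNat (none : Option Int)) 0 (some 0))) K none from by
    rw [aget_eq _ _ _ hK, hsim]]

-- ===== VERDICT (by name: the statement is the Claim_ definition above) =====
theorem find_min_price_spec : Claim_equal_find_min_price := by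
  intro K prices _ hKpre
  have hK : 0 ≤ K := hKpre
  unfold Spec_find_min_price
  rw [A_port_sim K prices hK, B_port_sim K prices hK, AL_eq_Dv K prices hK]
  have h := (pass2_inv K prices hK K.toNat le_rfl).2 K hK le_rfl
  rw [show ((K.toNat : Nat) : Int) = K from by omega] at h
  rw [PySem.List.pyGetD_of_nonneg _ _ hK, h]
  by_cases hK0 : K = 0
  · rw [if_pos hK0, hK0]; simp [Dv_zero]
  · rw [if_neg hK0, if_pos ⟨by omega, le_rfl, needed_K K prices hK⟩]
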